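-- pv_equiv track=rewrite | github.com/tmdgusya/PythonAlgorithmInterview | src/until_one/solution.py | solution
-- ===== SOURCE A (Python) =====
-- def solution(n, k):
--     result = 0
--     while n >= k:
--         while n % k != 0:
--             n = n - 1
--             result += 1
--         n //= k
--         result += 1
--
--     while n > 1:
--         n -= 1
--         result += 1
--     return result
-- ===== SOURCE B (Python) =====
-- def solution(n, k):
--     result = 0
--     while n >= k:
--         r = n % k
--         n = (n - r) // k
--         result += r + 1
--     if n > 1:
--         result += n - 1
--     return result
-- ===== Notes on version B (the rewrite author's own statement) =====
-- stated objective: faster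
-- what changed: The unit-decrement inner loop and the trailing unit-decrement loop are replaced by remainder arithmetic: per outer step result += n%k + 1 and n = (n - n%k)//k, and a final result += n-1.
-- outside the precondition, e.g. on solution(7, -2): A returns 2, B returns 0; on solution(5, 0): A raises ZeroDivisionError, B raises ZeroDivisionError
import Mathlib
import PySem

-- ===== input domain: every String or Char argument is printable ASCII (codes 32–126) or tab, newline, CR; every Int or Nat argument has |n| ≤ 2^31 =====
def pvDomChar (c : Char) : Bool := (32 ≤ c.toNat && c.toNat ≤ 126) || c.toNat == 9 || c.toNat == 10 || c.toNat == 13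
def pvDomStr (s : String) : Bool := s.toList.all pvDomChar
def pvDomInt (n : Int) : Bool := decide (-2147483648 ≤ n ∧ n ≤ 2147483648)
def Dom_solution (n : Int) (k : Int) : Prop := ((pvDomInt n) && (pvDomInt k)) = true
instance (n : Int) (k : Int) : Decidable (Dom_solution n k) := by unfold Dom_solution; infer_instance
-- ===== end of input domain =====

-- B replaces A's unit-decrement loops by remainder arithmetic; measurably faster (asymptotic).
-- Loops are recursions over a fuel parameter: a pure totality guard, provably sufficient on Pre_.

-- ===== PORT A =====
-- inner loop 'while n % k != 0: n = n - 1; result += 1'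
def solInner (fuel : Nat) (k n result : Int) : Int × Int :=
  match fuel with
  | 0 => (n, result)
  | fuel + 1 =>
    if PySem.Int.mod n k ≠ 0 then solInner fuel k (n - 1) (result + 1)
    else (n, result)

-- outer loop 'while n >= k: <inner loop>; n //= k; result += 1'
def solOuter (fuel : Nat) (k n result : Int) : Int × Int :=
  match fuel with
  | 0 => (n, result)
  | fuel + 1 =>
    if n ≥ k then
      let p := solInner (k.natAbs + 1) k n result
      solOuter fuel k (PySem.Int.floordiv p.1 k) (p.2 + 1)
    else (n, result)

-- trailing loop 'while n > 1: n -= 1; result += 1'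
def solTail (fuel : Nat) (n result : Int) : Int :=
  match fuel with
  | 0 => result
  | fuel + 1 => if n > 1 then solTail fuel (n - 1) (result + 1) else result

def solution (n : Int) (k : Int) : Int :=
  let p := solOuter (n.toNat + 1) k n 0
  solTail (p.1.toNat + 1) p.1 p.2

-- ===== PORT B =====
def altLoop (fuel : Nat) (k n result : Int) : Int × Int :=
  match fuel with
  | 0 => (n, result)
  | fuel + 1 =>
    if n ≥ k then
      let r := PySem.Int.mod n k
      altLoop fuel k (PySem.Int.floordiv (n - r) k) (result + r + 1)
    else (n, result)

def solution_alt (n : Int) (k : Int) : Int :=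
  let p := altLoop (n.toNat + 1) k n 0
  if p.1 > 1 then p.2 + (p.1 - 1) else p.2

-- ===== PRECONDITION & SPEC =====
-- Pre_ excludes k < 2 with n ≥ k: there A raises ZeroDivisionError (k = 0), diverges
-- (k = 1 and most k < 0), or — for a few negative k — returns a count that is an
-- accident of negative-divisor floor semantics, outside the task's natural domain.
def Pre_solution (n : Int) (k : Int) : Prop := 2 ≤ k ∨ n < k
instance (n : Int) (k : Int) : Decidable (Pre_solution n k) := by unfold Pre_solution; infer_instance
def pvWitness_solution : Int × Int := (10, 3)

def Spec_solution (n : Int) (k : Int) (out : Int) : Prop := out = solution_alt n k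
instance (n : Int) (k : Int) (out : Int) : Decidable (Spec_solution n k out) := by unfold Spec_solution; infer_instance

-- ===== CLAIM (what is proved, stated in full; the proofs are below) =====
def Claim_equal_solution : Prop := ∀ (n : Int) (k : Int), Dom_solution n k → Pre_solution n k → Spec_solution n k (solution n k)

-- ===== LEMMAS AND PROOFS =====

-- facts about Python's n % k for k ≥ 2
theorem pvModFacts (k n : Int) (hk : 2 ≤ k) :
    0 ≤ PySem.Int.mod n k ∧ PySem.Int.mod n k < k ∧
      (PySem.Int.mod n k ≠ 0 → PySem.Int.mod (n - 1) k = PySem.Int.mod n k - 1) := by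
  rw [PySem.Int.mod_eq_emod_of_pos (a := n) (b := k) (by omega),
      PySem.Int.mod_eq_emod_of_pos (a := n - 1) (b := k) (by omega)]
  refine ⟨Int.emod_nonneg n (by omega), Int.emod_lt_of_pos n (by omega), ?_⟩
  intro h
  have h1 : 0 ≤ n % k := Int.emod_nonneg n (by omega)
  have h2 : n % k < k := Int.emod_lt_of_pos n (by omega)
  have h3 : (n - 1) % k = (n % k - 1 % k) % k := Int.sub_emod n 1 k
  have h4 : (1 : Int) % k = 1 := Int.emod_eq_of_lt (by omega) (by omega)
  have h5 : (n % k - 1) % k = n % k - 1 := Int.emod_eq_of_lt (by omega) (by omega)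
  rw [h3, h4, h5]

-- one outer step strictly shrinks n
theorem pvNextLt (k n : Int) (hk : 2 ≤ k) (h : k ≤ n) :
    (PySem.Int.floordiv (n - PySem.Int.mod n k) k).toNat < n.toNat := by
  rw [PySem.Int.floordiv_eq_ediv_of_pos (by omega), PySem.Int.mod_eq_emod_of_pos (by omega)]
  have hd : k * (n / k) + n % k = n := Int.mul_ediv_add_emod n k
  have h1 : n - n % k = k * (n / k) := by omega
  rw [h1, Int.mul_ediv_cancel_left _ (by omega : k ≠ 0)]
  have hr : 0 ≤ n % k := Int.emod_nonneg n (by omega)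
  have hq1 : 1 ≤ n / k := by
    rw [Int.le_ediv_iff_mul_le (by omega : (0:Int) < k)]; omega
  have hm : 2 * (n / k) ≤ k * (n / k) := Int.mul_le_mul_of_nonneg_right (by omega) (by omega)
  omega

-- with enough fuel, A's inner loop subtracts n % k in one go
theorem solInner_eq (fuel : Nat) (k : Int) (hk : 2 ≤ k) : ∀ (n result : Int),
    (PySem.Int.mod n k).toNat < fuel →
    solInner fuel k n result = (n - PySem.Int.mod n k, result + PySem.Int.mod n k) := by
  induction fuel with
  | zero => intro n result hle; omega
  | succ fuel ih =>
    intro n result hle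
    rw [solInner]
    by_cases h : PySem.Int.mod n k = 0
    · simp [h]
    · have hf := pvModFacts k n hk
      have hstep := hf.2.2 h
      simp only [h, ne_eq, not_false_iff, if_pos]
      rw [ih (n - 1) (result + 1) (by omega), hstep]
      simp only [Prod.mk.injEq]
      omega

-- with enough fuel, A's outer loop and B's loop coincide step for step
theorem outer_eq_alt (fuel : Nat) (k : Int) (hk : 2 ≤ k) : ∀ (n result : Int),
    n.toNat < fuel → solOuter fuel k n result = altLoop fuel k n result := by
  induction fuel with
  | zero => intro n result hle; omega
  | succ fuel ih =>
    intro n result hle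
    rw [solOuter, altLoop]
    by_cases h : n ≥ k
    · have hf := pvModFacts k n hk
      have hfuel : (PySem.Int.mod n k).toNat < k.natAbs + 1 := by omega
      simp only [h, if_pos]
      rw [solInner_eq (k.natAbs + 1) k hk n result hfuel]
      simp only []
      have hnext := pvNextLt k n hk (by omega)
      exact ih _ _ (by omega)
    · simp [h]

-- A's trailing loop in closed form
theorem solTail_eq (fuel : Nat) : ∀ (n result : Int), n.toNat < fuel →
    solTail fuel n result = if n > 1 then result + (n - 1) else result := by
  induction fuel with
  | zero => intro n result hle; omega
  | succ fuel ih =>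
    intro n result hle
    rw [solTail]
    by_cases h : n > 1
    · simp only [h, if_pos]
      rw [ih (n - 1) (result + 1) (by omega)]
      split_ifs <;> omega
    · simp [h]

-- for k < 2 (inside Pre_, so n < k) both loops are skipped at once
theorem loops_skip (fuel : Nat) (k n result : Int) (h : n < k) :
    solOuter fuel k n result = (n, result) ∧ altLoop fuel k n result = (n, result) := by
  cases fuel with
  | zero => exact ⟨rfl, rfl⟩
  | succ fuel =>
    rw [solOuter, altLoop]
    have h' : ¬ n ≥ k := by omega
    simp [h']

-- ===== VERDICT (by name: the statement is the Claim_ definition above) =====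
theorem solution_spec : Claim_equal_solution := by
  intro n k _ hpre
  unfold Spec_solution solution solution_alt
  by_cases hk : 2 ≤ k
  · -- after rewriting A's outer loop into B's loop, the remaining trailing loop
    -- computes B's final 'if' definitionally (solTail_eq in closed form)
    have h1 := outer_eq_alt (n.toNat + 1) k hk n 0 (by omega)
    rw [h1]
    exact solTail_eq ((altLoop (n.toNat + 1) k n 0).1.toNat + 1)
      (altLoop (n.toNat + 1) k n 0).1 (altLoop (n.toNat + 1) k n 0).2 (by omega)
  · have hn : n < k := hpre.resolve_left hk
    have hs := loops_skip (n.toNat + 1) k n 0 hn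
    rw [hs.1, hs.2]
    exact solTail_eq (((n, 0) : Int × Int).1.toNat + 1)
      ((n, 0) : Int × Int).1 ((n, 0) : Int × Int).2 (by omega)
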